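-- pv_equiv track=rewrite | github.com/anton-baykalov/toytoric | toy_setup.py | ith_solution
-- ===== SOURCE A (Python) =====
-- import math
--
-- def ith_solution(i, k, d):
--     # ith solution of x_1 + ... x_k =d
--     # i index starting from 0, k -- number of variables, d -- the sum
--     n = d + k - 1  # Total positions
--     result = []
--     stars_left = d
--     bars_left = k - 1
--     pos = 0  # current position
--
--     while bars_left > 0:
--         count = 0
--         # Try placing 0 to stars_left stars before next bar
--         for x in range(stars_left + 1):
--             ways = math.comb(stars_left - x + bars_left - 1, bars_left - 1)
--             if count + ways > i:
--                 result.append(x)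
--                 i -= count
--                 stars_left -= x
--                 bars_left -= 1
--                 break
--             count += ways
--
--     result.append(stars_left)  # Last variable gets remaining stars
--     return result[::-1]
-- ===== SOURCE B (Python) =====
-- import math
--
-- def ith_solution(i, k, d):
--     # A's enumeration order is lexicographic on the k-1 bar positions among
--     # n = d+k-1 slots.  B unranks the mirrored rank r = C(n,k-1)-1-i in the
--     # combinatorial number system (greedy colex: repeatedly take the largest
--     # t with C(t,b) <= r, maintaining C(t,b) by multiplicative updates while
--     # descending), then reads the parts off as gaps between consecutive
--     # digits (with the sentinel n in front).
--     n = d + k - 1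
--     b = k - 1
--     if b <= 0:
--         return [d]
--     r = math.comb(n, b) - 1 - i
--     ts = [n]  # sentinel, then the colex digits (strictly decreasing)
--     t = n - 1
--     while b > 0:
--         c = math.comb(t, b)
--         while c > r:
--             c = c * (t - b) // t
--             t -= 1
--         ts.append(t)
--         r -= c
--         b -= 1
--         t -= 1
--     rts = ts[::-1]
--     return [rts[0]] + [u - v - 1 for u, v in zip(rts[1:], rts)]
-- ===== Notes on version B (the rewrite author's own statement) =====
-- stated objective: alternative
-- what changed: A decodes each of the k-1 digits by a linear scan accumulating math.comb terms until the count exceeds i; B instead observes that A's order is lexicographic on the bar positions, mirrors the rank to r = C(n,k-1)-1-i, unranks r in the combinatorial number system by a greedy descent maintaining C(t,b) via multiplicative updates (no comb calls in the inner loop), and reads the parts off as gaps between consecutive colex digits.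
import Mathlib
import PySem

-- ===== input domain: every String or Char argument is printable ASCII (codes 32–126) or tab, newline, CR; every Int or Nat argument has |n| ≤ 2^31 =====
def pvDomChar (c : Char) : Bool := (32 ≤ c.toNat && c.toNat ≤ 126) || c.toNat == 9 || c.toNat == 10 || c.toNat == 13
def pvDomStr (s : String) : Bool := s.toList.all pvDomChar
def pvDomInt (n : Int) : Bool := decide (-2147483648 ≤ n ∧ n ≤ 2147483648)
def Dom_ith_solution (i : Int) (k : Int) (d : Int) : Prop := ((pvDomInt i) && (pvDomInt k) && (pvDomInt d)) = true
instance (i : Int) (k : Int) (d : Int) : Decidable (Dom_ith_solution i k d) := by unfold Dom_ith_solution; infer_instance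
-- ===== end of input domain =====

-- B replaces A's per-digit linear scan over comb prefix sums by colex unranking in
-- the combinatorial number system of the mirrored rank (objective: alternative).

-- n choose k, evaluated by the falling-factorial formula on the smaller side
-- (equal to Nat.choose — proved in fastChoose_eq below — but fast to #eval)
def fastChoose (n k : Nat) : Nat :=
  if k ≤ n then (n.descFactorial (min k (n - k))) / (min k (n - k)).factorial else 0

-- math.comb a b; Python raises ValueError on negative arguments — inside Pre_ every
-- call below has nonnegative arguments, so the 0 branch is unreachable there.
def pyComb (a b : Int) : Int :=
  if 0 ≤ a ∧ 0 ≤ b then ((fastChoose a.toNat b.toNat : Nat) : Int) else 0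

-- ===== PORT A =====
-- inner `for x in range(stars_left + 1)` loop: x counts up, fuel = remaining
-- iterations; returns (x, count) at the break, none if the loop finishes
def ithA_scan (i s b : Int) : Nat → Int → Int → Option (Int × Int)
  | 0, _, _ => none
  | fuel+1, x, count =>
      let ways := pyComb (s - x + b - 1) (b - 1)
      if i < count + ways then some (x, count)
      else ithA_scan i s b fuel (x + 1) (count + ways)

-- the `while bars_left > 0` loop; fuel = (k-1).toNat: bars_left decreases by 1 per
-- iteration.  When the inner loop finds no break the Python loops forever — we stop
-- there (unreachable inside Pre_, which is exactly where A terminates).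
def ithA_loop : Nat → Int → Int → Int → List Int → List Int × Int
  | 0, _, s, _, res => (res, s)
  | fuel+1, i, s, b, res =>
      if 0 < b then
        match ithA_scan i s b (s + 1).toNat 0 0 with
        | some (x, count) => ithA_loop fuel (i - count) (s - x) (b - 1) (res ++ [x])
        | none => (res, s)
      else (res, s)

def ith_solution (i : Int) (k : Int) (d : Int) : List Int :=
  let p := ithA_loop (k - 1).toNat i d (k - 1) []
  (p.1 ++ [p.2]).reverse   -- result.append(stars_left); result[::-1]

-- ===== PORT B =====
-- inner `while c > r` descent: c = c*(t-b)//t keeps c = C(t,b) while t decreases;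
-- fuel = (t+1).toNat bounds the descent (it stops by t = b-1 whenever 0 ≤ r,
-- i.e. everywhere inside Pre_; for r < 0 the Python diverges/raises — outside Pre_)
def ithB_desc (r b : Int) : Nat → Int → Int → Int × Int
  | 0, t, c => (t, c)
  | fuel+1, t, c =>
      if r < c then ithB_desc r b fuel (t - 1) (PySem.Int.floordiv (c * (t - b)) t)
      else (t, c)

-- the `while b > 0` loop collecting the colex digits after the sentinel
def ithB_loop : Nat → Int → Int → Int → List Int → List Int
  | 0, _, _, _, ts => ts
  | fuel+1, r, t, b, ts =>
      if 0 < b then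
        let tc := ithB_desc r b (t + 1).toNat t (pyComb t b)
        ithB_loop fuel (r - tc.2) (tc.1 - 1) (b - 1) (ts ++ [tc.1])
      else ts

-- `rts = ts[::-1]; [rts[0]] + [u - v - 1 for u, v in zip(rts[1:], rts)]`
-- (rts[0] on the empty list would raise in Python; ts always starts with the
-- sentinel, so the getD default is unreachable)
def ithB_out (ts : List Int) : List Int :=
  ((PySem.List.pyGet? ts.reverse 0).getD 0)
    :: List.zipWith (fun u v => u - v - 1) (ts.reverse.drop 1) ts.reverse

def ith_solution_alt (i : Int) (k : Int) (d : Int) : List Int :=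
  let n := d + k - 1
  let b := k - 1
  if b ≤ 0 then [d]
  else
    let r := pyComb n b - 1 - i
    ithB_out (ithB_loop b.toNat r (n - 1) b [n])

-- ===== PRECONDITION & SPEC =====
-- capped binomial: multiplicative product C(m+j, j), stopping once it reaches cap;
-- min (chooseCapped n r cap) cap = min (C(n,r)) cap (lemma chooseCapped_spec), so a
-- comparison of C(n,r) against a small bound is decidable without computing a huge C(n,r).
-- It exists only to make the Decidable instance for Pre_ evaluate fast.
def chooseLoop (m cap : Nat) : Nat → Nat → Nat → Nat
  | 0, _, acc => acc
  | fuel+1, j, acc =>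
      if cap ≤ acc then acc
      else chooseLoop m cap fuel (j + 1) (acc * (m + j) / j)

def chooseCapped (n r cap : Nat) : Nat :=
  if r ≤ n then chooseLoop (n - min r (n - r)) cap (min r (n - r)) 1 1 else 0

theorem choose_le_add (m a : Nat) : ∀ t, (m + a).choose a ≤ (m + a + t).choose (a + t) := by
  intro t
  induction t with
  | zero => exact le_refl _
  | succ t ih =>
      refine le_trans ih ?_
      have e1 : m + a + (t + 1) = (m + a + t) + 1 := by omega
      have e2 : a + (t + 1) = (a + t) + 1 := by omega
      rw [e1, e2, Nat.choose_succ_succ]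
      exact Nat.le_add_right _ _

theorem chooseLoop_spec (m cap : Nat) : ∀ (fuel jm1 acc : Nat),
    acc = (m + jm1).choose jm1 →
    min (chooseLoop m cap fuel (jm1 + 1) acc) cap
      = min ((m + jm1 + fuel).choose (jm1 + fuel)) cap := by
  intro fuel
  induction fuel with
  | zero => intro jm1 acc hacc; simp only [chooseLoop, Nat.add_zero]; rw [hacc]
  | succ t ih =>
      intro jm1 acc hacc
      simp only [chooseLoop]
      by_cases hcap : cap ≤ acc
      · rw [if_pos hcap]
        have hmono := choose_le_add m jm1 (t + 1)
        omega
      · rw [if_neg hcap]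
        have hid := Nat.add_one_mul_choose_eq (m + jm1) jm1
        have hstep : acc * (m + (jm1 + 1)) / (jm1 + 1) = (m + (jm1 + 1)).choose (jm1 + 1) := by
          have e : acc * (m + (jm1 + 1)) = (m + (jm1 + 1)).choose (jm1 + 1) * (jm1 + 1) := by
            rw [hacc]
            have e2 : m + (jm1 + 1) = (m + jm1) + 1 := by omega
            rw [e2, mul_comm ((m + jm1).choose jm1) ((m + jm1) + 1)]
            exact_mod_cast hid
          rw [e, Nat.mul_div_cancel _ (by omega)]
        rw [hstep]
        have h := ih (jm1 + 1) _ rfl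
        have e3 : m + (jm1 + 1) + t = m + jm1 + (t + 1) := by omega
        have e4 : jm1 + 1 + t = jm1 + (t + 1) := by omega
        rw [e3, e4] at h
        exact h

theorem chooseCapped_spec (n r cap : Nat) :
    min (chooseCapped n r cap) cap = min (n.choose r) cap := by
  unfold chooseCapped
  split
  · rename_i h
    by_cases hm : r ≤ n - r
    · have e2 : min r (n - r) = r := by omega
      rw [e2]
      have h1 : (1 : Nat) = (n - r + 0).choose 0 := by simp
      have h2 := chooseLoop_spec (n - r) cap r 0 1 h1
      simp only [Nat.zero_add, Nat.add_zero] at h2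
      have e : n - r + r = n := by omega
      rw [e] at h2
      exact h2
    · have e2 : min r (n - r) = n - r := by omega
      rw [e2]
      have h1 : (1 : Nat) = (n - (n - r) + 0).choose 0 := by simp
      have h2 := chooseLoop_spec (n - (n - r)) cap (n - r) 0 1 h1
      simp only [Nat.zero_add, Nat.add_zero] at h2
      have e : n - (n - r) + (n - r) = n := by omega
      rw [e, Nat.choose_symm h] at h2
      exact h2
  · rename_i h
    rw [Nat.choose_eq_zero_of_lt (by omega)]

-- Pre_ is exactly where A terminates: k < 2 (A returns [d]), or 0 ≤ d and
-- i < C(d+k-1, k-1), the number of solutions; for k ≥ 2 with d < 0 or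
-- i ≥ C(d+k-1, k-1) A's while-loop never progresses (A diverges).
def Pre_ith_solution (i : Int) (k : Int) (d : Int) : Prop :=
  k < 2 ∨ (0 ≤ d ∧ i < ((d + k - 1).toNat.choose (k - 1).toNat : Int))

theorem pre_fast_iff (i k d : Int) :
    (k < 2 ∨ (0 ≤ d ∧ (i < 0 ∨
        i.toNat < chooseCapped (d + k - 1).toNat (k - 1).toNat (i.toNat + 1)))) ↔
      Pre_ith_solution i k d := by
  unfold Pre_ith_solution
  have hmin := chooseCapped_spec (d + k - 1).toNat (k - 1).toNat (i.toNat + 1)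
  have hnn : (0 : Int) ≤ ((d + k - 1).toNat.choose (k - 1).toNat : Int) := by positivity
  constructor
  · rintro (hk | ⟨hd, hneg | hcap⟩)
    · exact Or.inl hk
    · exact Or.inr ⟨hd, by omega⟩
    · refine Or.inr ⟨hd, ?_⟩
      have hlt : i.toNat < (d + k - 1).toNat.choose (k - 1).toNat := by omega
      by_cases hi0 : i < 0
      · omega
      · have : (i.toNat : Int) = i := Int.toNat_of_nonneg (by omega)
        omega
  · rintro (hk | ⟨hd, hlt⟩)
    · exact Or.inl hk
    · refine Or.inr ⟨hd, ?_⟩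
      by_cases hi0 : i < 0
      · exact Or.inl hi0
      · refine Or.inr ?_
        have hcast : (i.toNat : Int) = i := Int.toNat_of_nonneg (by omega)
        have : i.toNat < (d + k - 1).toNat.choose (k - 1).toNat := by omega
        omega

instance (i : Int) (k : Int) (d : Int) : Decidable (Pre_ith_solution i k d) :=
  decidable_of_iff _ (pre_fast_iff i k d)

def pvWitness_ith_solution : Int × Int × Int := (7, 3, 4)

def Spec_ith_solution (i : Int) (k : Int) (d : Int) (out : List Int) : Prop := out = ith_solution_alt i k d
instance (i : Int) (k : Int) (d : Int) (out : List Int) : Decidable (Spec_ith_solution i k d out) := by unfold Spec_ith_solution; infer_instance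

-- ===== CLAIM (what is proved, stated in full; the proofs are below) =====
def Claim_equal_ith_solution : Prop := ∀ (i : Int) (k : Int) (d : Int), Dom_ith_solution i k d → Pre_ith_solution i k d → Spec_ith_solution i k d (ith_solution i k d)

-- ===== LEMMAS AND PROOFS =====

-- the break predicate of A's scan: prefix(x) = total - C(s-x+b-1, b) exceeds i
def pvP (i s b total x : Int) : Prop := i < total - pyComb (s - x + b - 1) b

-- x is the least break point in [0, s]
def pvGood (i s b total x : Int) : Prop :=
  0 ≤ x ∧ x ≤ s ∧ pvP i s b total x ∧ ∀ y, 0 ≤ y → y < x → ¬ pvP i s b total y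

-- the digit list B's loop collects, expressed from A's digit list
def pvDigits : Int → Int → List Int → List Int
  | _, _, [] => []
  | s, b, x :: xs => (s - x + b - 1) :: pvDigits (s - x) (b - 1) xs

theorem fastChoose_eq (n k : Nat) : fastChoose n k = n.choose k := by
  unfold fastChoose
  split
  · rename_i h
    by_cases hm : k ≤ n - k
    · have e : min k (n - k) = k := by omega
      rw [e, ← Nat.choose_eq_descFactorial_div_factorial]
    · have e : min k (n - k) = n - k := by omega
      rw [e, ← Nat.choose_eq_descFactorial_div_factorial, Nat.choose_symm h]
  · rename_i h
    exact (Nat.choose_eq_zero_of_lt (by omega)).symm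

theorem pyComb_eq (a c : Int) (ha : 0 ≤ a) (hc : 0 ≤ c) :
    pyComb a c = ((a.toNat.choose c.toNat : Nat) : Int) := by
  unfold pyComb
  rw [if_pos ⟨ha, hc⟩, fastChoose_eq]

theorem pyComb_nonneg (a c : Int) : 0 ≤ pyComb a c := by
  unfold pyComb; split <;> simp

theorem pyComb_pascal (a c : Int) (ha : 0 ≤ a) (hc : 1 ≤ c) :
    pyComb (a + 1) c = pyComb a c + pyComb a (c - 1) := by
  rw [pyComb_eq (a + 1) c (by omega) (by omega), pyComb_eq a c ha (by omega),
      pyComb_eq a (c - 1) ha (by omega)]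
  have e1 : (a + 1).toNat = a.toNat + 1 := by omega
  have e2 : c.toNat = (c - 1).toNat + 1 := by omega
  rw [e1, e2, Nat.choose_succ_succ]
  push_cast; ring

theorem pyComb_pos_le (a c : Int) (h : 0 < pyComb a c) : c ≤ a := by
  by_contra hca
  have hz : pyComb a c = 0 := by
    unfold pyComb
    split
    · rename_i hac
      rw [fastChoose_eq, Nat.choose_eq_zero_of_lt (by omega)]; rfl
    · rfl
  omega

-- A's linear scan finds the least break point, together with the prefix before it
theorem scan_spec (i s b total : Int) (hb : 1 ≤ b) (hs : 0 ≤ s)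
    (hPs : pvP i s b total s) :
    ∀ (fuel : Nat) (x count : Int), 0 ≤ x → s < x + fuel →
      (∀ y, 0 ≤ y → y < x → ¬ pvP i s b total y) →
      count = total - pyComb (s - x + b) b →
      ∃ xr, pvGood i s b total xr ∧
        ithA_scan i s b fuel x count = some (xr, total - pyComb (s - xr + b) b) := by
  intro fuel
  induction fuel with
  | zero =>
      intro x count hx0 hlt hmin _
      exact absurd hPs (hmin s (by omega) (by omega))
  | succ n ih =>
      intro x count hx0 hlt hmin hcount
      have hxs : x ≤ s := by
        by_contra hxs
        exact hmin s (by omega) (by omega) hPs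
      simp only [ithA_scan]
      by_cases hP : pvP i s b total x
      · have hpascal : pyComb (s - x + b) b
            = pyComb (s - x + b - 1) b + pyComb (s - x + b - 1) (b - 1) := by
          have h := pyComb_pascal (s - x + b - 1) b (by omega) hb
          have e : s - x + b - 1 + 1 = s - x + b := by ring
          rw [e] at h; exact h
        have hlt' : i < count + pyComb (s - x + b - 1) (b - 1) := by
          unfold pvP at hP; omega
        rw [if_pos hlt']
        exact ⟨x, ⟨hx0, hxs, hP, hmin⟩, by rw [hcount]⟩
      · have hpascal : pyComb (s - x + b) b
            = pyComb (s - x + b - 1) b + pyComb (s - x + b - 1) (b - 1) := by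
          have h := pyComb_pascal (s - x + b - 1) b (by omega) hb
          have e : s - x + b - 1 + 1 = s - x + b := by ring
          rw [e] at h; exact h
        have hlt' : ¬ i < count + pyComb (s - x + b - 1) (b - 1) := by
          unfold pvP at hP; omega
        rw [if_neg hlt']
        apply ih (x + 1) _ (by omega) (by omega)
        · intro y hy0 hyx
          by_cases hyx' : y = x
          · subst hyx'; exact hP
          · exact hmin y hy0 (by omega)
        · have e : s - (x + 1) + b = s - x + b - 1 := by ring
          rw [e]; omega

-- the multiplicative descent step is exact: C(t,b)*(t-b) // t = C(t-1,b)
theorem desc_step (t b : Int) (hb : 1 ≤ b) (hbt : b ≤ t) :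
    PySem.Int.floordiv (pyComb t b * (t - b)) t = pyComb (t - 1) b := by
  have ht : 0 < t := by omega
  have hid : pyComb t b * (t - b) = t * pyComb (t - 1) b := by
    rw [pyComb_eq t b (by omega) (by omega), pyComb_eq (t - 1) b (by omega) (by omega)]
    by_cases hbt1 : b ≤ t - 1
    · -- (t-b) * C(t,b) = t * C(t-1,b), both times b!*(t-1-b)! give t!
      have h1 := Nat.choose_mul_factorial_mul_factorial (n := t.toNat) (k := b.toNat)
        (Int.toNat_le_toNat hbt)
      have h2 := Nat.choose_mul_factorial_mul_factorial (n := (t - 1).toNat) (k := b.toNat)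
        (by omega)
      have e1 : t.toNat - b.toNat = ((t - 1).toNat - b.toNat) + 1 := by omega
      have e2 : t.toNat = (t - 1).toNat + 1 := by omega
      rw [e1, Nat.factorial_succ] at h1
      have key : t.toNat.choose b.toNat * ((t - 1).toNat - b.toNat + 1)
          = ((t - 1).toNat + 1) * (t - 1).toNat.choose b.toNat := by
        have hpos : 0 < b.toNat.factorial * ((t - 1).toNat - b.toNat).factorial :=
          Nat.mul_pos (Nat.factorial_pos _) (Nat.factorial_pos _)
        apply Nat.eq_of_mul_eq_mul_right hpos
        calc t.toNat.choose b.toNat * ((t - 1).toNat - b.toNat + 1)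
              * (b.toNat.factorial * ((t - 1).toNat - b.toNat).factorial)
            = t.toNat.choose b.toNat * b.toNat.factorial
              * (((t - 1).toNat - b.toNat + 1) * ((t - 1).toNat - b.toNat).factorial) := by ring
          _ = t.toNat.factorial := by rw [h1]
          _ = ((t - 1).toNat + 1) * (t - 1).toNat.factorial := by
                rw [e2, Nat.factorial_succ]
          _ = ((t - 1).toNat + 1)
              * ((t - 1).toNat.choose b.toNat * b.toNat.factorial
                 * ((t - 1).toNat - b.toNat).factorial) := by rw [h2]
          _ = ((t - 1).toNat + 1) * (t - 1).toNat.choose b.toNat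
              * (b.toNat.factorial * ((t - 1).toNat - b.toNat).factorial) := by ring
      have keyN : ((t - 1).toNat - b.toNat + 1) * t.toNat.choose b.toNat
          = ((t - 1).toNat + 1) * (t - 1).toNat.choose b.toNat := by
        rw [mul_comm ((t - 1).toNat - b.toNat + 1)]; exact key
      calc ((t.toNat.choose b.toNat : Nat) : Int) * (t - b)
          = ((((t - 1).toNat - b.toNat + 1) * t.toNat.choose b.toNat : Nat) : Int) := by
            rw [Nat.cast_mul,
              show ((((t - 1).toNat - b.toNat + 1 : Nat)) : Int) = t - b from by omega]
            ring
        _ = ((((t - 1).toNat + 1) * (t - 1).toNat.choose b.toNat : Nat) : Int) :=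
            congrArg (fun m : Nat => (m : Int)) keyN
        _ = t * (((t - 1).toNat.choose b.toNat : Nat) : Int) := by
            rw [Nat.cast_mul, show ((((t - 1).toNat + 1 : Nat)) : Int) = t from by omega]
    · -- t = b: both sides are 0
      have hbe : b = t := by omega
      have hz : (t - 1).toNat.choose b.toNat = 0 := Nat.choose_eq_zero_of_lt (by omega)
      rw [hz]
      have : t - b = 0 := by omega
      rw [this]
      simp
  rw [hid, PySem.Int.floordiv_eq_ediv_of_pos ht, Int.mul_ediv_cancel_left _ (by omega)]

-- B's descent finds the greatest t' ≤ t with C(t',b) ≤ r, returning (t', C(t',b))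
theorem desc_run (r b : Int) (hb : 1 ≤ b) :
    ∀ (fuel : Nat) (t t0 : Int), b - 1 ≤ t0 → t0 ≤ t → pyComb t0 b ≤ r →
      t - t0 ≤ fuel →
      ∃ t', t0 ≤ t' ∧ t' ≤ t ∧ pyComb t' b ≤ r ∧
        (∀ y, t' < y → y ≤ t → r < pyComb y b) ∧
        ithB_desc r b fuel t (pyComb t b) = (t', pyComb t' b) := by
  intro fuel
  induction fuel with
  | zero =>
      intro t t0 hbt0 ht0t hc0 hfuel
      have : t = t0 := by omega
      subst this
      exact ⟨t, le_refl _, le_refl _, hc0, fun y h1 h2 => absurd (lt_of_lt_of_le h1 h2) (lt_irrefl _), rfl⟩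
  | succ n ih =>
      intro t t0 hbt0 ht0t hc0 hfuel
      simp only [ithB_desc]
      by_cases hrc : r < pyComb t b
      · rw [if_pos hrc]
        have hne : t0 ≠ t := fun he => by rw [he] at hc0; omega
        have hpos : 0 < pyComb t b := lt_of_le_of_lt (le_trans (pyComb_nonneg t0 b) hc0) hrc
        have hbt : b ≤ t := pyComb_pos_le t b hpos
        rw [desc_step t b hb hbt]
        obtain ⟨t', h1, h2, h3, h4, h5⟩ :=
          ih (t - 1) t0 hbt0 (by omega) hc0 (by omega)
        refine ⟨t', h1, by omega, h3, ?_, h5⟩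
        intro y hy1 hy2
        by_cases hyt : y = t
        · rw [hyt]; exact hrc
        · exact h4 y hy1 (by omega)
      · rw [if_neg hrc]
        exact ⟨t, ht0t, le_refl _, by omega,
          fun y h1 h2 => absurd (lt_of_lt_of_le h1 h2) (lt_irrefl _), rfl⟩

-- the two loops run in lock-step: A collects digits xs, B collects pvDigits s b xs
theorem loops_corr :
    ∀ (fuel : Nat) (i s b : Int) (resA tsB : List Int),
      0 ≤ s → 0 ≤ b → fuel = b.toNat → i < pyComb (s + b) b →
      ∃ xs, ithA_loop fuel i s b resA = (resA ++ xs, s - xs.sum) ∧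
        (xs.length : Int) = b ∧
        ithB_loop fuel (pyComb (s + b) b - 1 - i) (s + b - 1) b tsB
          = tsB ++ pvDigits s b xs := by
  intro fuel
  induction fuel with
  | zero =>
      intro i s b resA tsB hs hb hfuel hi
      have hb0 : b = 0 := by omega
      subst hb0
      exact ⟨[], by simp [ithA_loop], by simp, by simp [ithB_loop, pvDigits]⟩
  | succ n ih =>
      intro i s b resA tsB hs hb hfuel hi
      have hb1 : 1 ≤ b := by omega
      set T := pyComb (s + b) b with hT
      -- A's scan succeeds: pvP holds at x = s
      have hPs : pvP i s b T s := by
        unfold pvP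
        have e : s - s + b - 1 = b - 1 := by ring
        rw [e]
        have hz : pyComb (b - 1) b = 0 := by
          rw [pyComb_eq (b - 1) b (by omega) (by omega),
              Nat.choose_eq_zero_of_lt (by omega)]
          rfl
        omega
      obtain ⟨x, ⟨hx0, hxs, hPx, hmin⟩, hscan⟩ :=
        scan_spec i s b T hb1 hs hPs (s + 1).toNat 0 0 (by omega) (by omega)
          (by omega)
          (by have e : s - 0 + b = s + b := by ring
              rw [e]; omega)
      -- B's descent lands exactly on t' = s - x + b - 1
      have hr0 : pyComb (s - x + b - 1) b ≤ T - 1 - i := by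
        unfold pvP at hPx; omega
      obtain ⟨t', h1, h2, h3, h4, hdesc⟩ :=
        desc_run (T - 1 - i) b hb1 (s + b - 1 + 1).toNat (s + b - 1)
          (s - x + b - 1) (by omega) (by omega) hr0 (by omega)
      have ht' : t' = s - x + b - 1 := by
        by_contra hne
        have hgt : s - x + b - 1 < t' := by omega
        -- t' = s - y + b - 1 for y = s + b - 1 - t' with 0 ≤ y < x; minimality of x
        have hy := hmin (s + b - 1 - t') (by omega) (by omega)
        unfold pvP at hy
        have he : s - (s + b - 1 - t') + b - 1 = t' := by ring
        rw [he] at hy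
        omega
      -- run the two loop bodies one step
      have hpascal : pyComb (s - x + b) b
          = pyComb (s - x + b - 1) b + pyComb (s - x + b - 1) (b - 1) := by
        have h := pyComb_pascal (s - x + b - 1) b (by omega) hb1
        have e : s - x + b - 1 + 1 = s - x + b := by ring
        rw [e] at h; exact h
      have hinext : i - (T - pyComb (s - x + b) b) < pyComb ((s - x) + (b - 1)) (b - 1) := by
        have e : (s - x) + (b - 1) = s - x + b - 1 := by ring
        rw [e]
        unfold pvP at hPx
        omega
      obtain ⟨xs', hA', hlen', hB'⟩ :=
        ih (i - (T - pyComb (s - x + b) b)) (s - x) (b - 1) (resA ++ [x]) (tsB ++ [t'])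
          (by omega) (by omega) (by omega) hinext
      refine ⟨x :: xs', ?_, by simp; omega, ?_⟩
      · -- A's step
        simp only [ithA_loop, if_pos (show 0 < b by omega), hscan]
        rw [hA']
        refine Prod.ext ?_ ?_
        · simp
        · simp only [List.sum_cons]; ring
      · -- B's step
        simp only [ithB_loop, if_pos (show 0 < b by omega)]
        rw [hdesc]
        dsimp only
        have er : T - 1 - i - pyComb t' b
            = pyComb ((s - x) + (b - 1)) (b - 1) - 1 - (i - (T - pyComb (s - x + b) b)) := by
          rw [ht']
          have e : (s - x) + (b - 1) = s - x + b - 1 := by ring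
          rw [e]
          omega
        have et : t' - 1 = (s - x) + (b - 1) - 1 := by omega
        rw [er, et, hB', ht']
        simp [pvDigits]
      
-- adjacent differences recover the digits: the zipWith part of ithB_out
theorem zip_snoc (f : Int → Int → Int) :
    ∀ (u : List Int) (h : u ≠ []) (a : Int),
      List.zipWith f (u.drop 1 ++ [a]) (u ++ [a])
        = List.zipWith f (u.drop 1) u ++ [f a (u.getLast h)] := by
  intro u
  induction u with
  | nil => intro h a; exact absurd rfl h
  | cons w u' ih =>
      intro h a
      cases u' with
      | nil => simp
      | cons v u'' =>
          have h' : (v :: u'') ≠ [] := by simp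
          have ihh := ih h' a
          simp only [List.drop_succ_cons, List.drop_zero, List.cons_append] at ihh ⊢
          rw [List.getLast_cons h']
          simp only [List.zipWith_cons_cons]
          rw [ihh]
          simp

-- peeling one sentinel/digit off the front of ithB_out appends its gap at the back
theorem out_cons (a : Int) (ts : List Int) (h : ts ≠ []) :
    ithB_out (a :: ts) = ithB_out ts ++ [a - ts.head h - 1] := by
  unfold ithB_out
  have hrev : (a :: ts).reverse = ts.reverse ++ [a] := by simp
  have hne : ts.reverse ≠ [] := by simp [h]
  rw [hrev]
  have hdrop : (ts.reverse ++ [a]).drop 1 = ts.reverse.drop 1 ++ [a] := by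
    cases hh : ts.reverse with
    | nil => exact absurd hh hne
    | cons w u => simp
  rw [hdrop, zip_snoc _ (ts.reverse) hne a]
  simp only [List.cons_append]
  have hlast : ts.reverse.getLast hne = ts.head h := by
    cases ts with
    | nil => exact absurd rfl h
    | cons w u => simp
  have hget : (PySem.List.pyGet? (ts.reverse ++ [a]) 0).getD 0
      = (PySem.List.pyGet? ts.reverse 0).getD 0 := by
    cases hh : ts.reverse with
    | nil => exact absurd hh hne
    | cons w u =>
        rw [List.cons_append, PySem.List.pyGet?_zero_cons, PySem.List.pyGet?_zero_cons]
  rw [hget, hlast]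

-- the full output lemma: sentinel + digits → reversed composition
theorem out_eq : ∀ (xs : List Int) (s b : Int), (xs.length : Int) = b →
    ithB_out ((s + b) :: pvDigits s b xs) = (xs ++ [s - xs.sum]).reverse := by
  intro xs
  induction xs with
  | nil =>
      intro s b hb
      have hb0 : b = 0 := by simpa using hb.symm
      subst hb0
      simp only [pvDigits, List.nil_append, List.sum_nil, Int.add_zero, Int.sub_zero]
      simp [ithB_out, PySem.List.pyGet?, PySem.List.pyIdx?]
  | cons x xs' ih =>
      intro s b hb
      have hlen : (xs'.length : Int) = b - 1 := by
        simp only [List.length_cons] at hb; push_cast at hb ⊢; omega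
      have hIH := ih (s - x) (b - 1) hlen
      have he : (s - x) + (b - 1) = s - x + b - 1 := by ring
      rw [he] at hIH
      have hne : pvDigits s b (x :: xs') ≠ [] := by simp [pvDigits]
      rw [out_cons (s + b) _ hne]
      have hhead : (pvDigits s b (x :: xs')).head hne = s - x + b - 1 := by
        simp [pvDigits]
      rw [hhead]
      simp only [pvDigits]
      rw [hIH]
      have egap : s + b - (s - x + b - 1) - 1 = x := by ring
      rw [egap]
      have esum : (s - x) - xs'.sum = s - (x :: xs').sum := by
        simp [List.sum_cons]; ring
      rw [esum]
      simp

-- ===== VERDICT (by name: the statement is the Claim_ definition above) =====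
theorem ith_solution_spec : Claim_equal_ith_solution := by
  intro i k d _ hpre
  unfold Spec_ith_solution ith_solution ith_solution_alt
  by_cases hk : k < 2
  · have h0 : (k - 1).toNat = 0 := by omega
    show ((ithA_loop (k - 1).toNat i d (k - 1) []).1
        ++ [(ithA_loop (k - 1).toNat i d (k - 1) []).2]).reverse
      = if k - 1 ≤ 0 then [d]
        else ithB_out (ithB_loop (k - 1).toNat (pyComb (d + k - 1) (k - 1) - 1 - i)
          (d + k - 1 - 1) (k - 1) [d + k - 1])
    rw [h0, if_pos (show k - 1 ≤ 0 by omega)]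
    simp [ithA_loop]
  · have hk2 : 2 ≤ k := by omega
    rcases hpre with hlt | ⟨hd, hi⟩
    · omega
    · have hi' : i < pyComb (d + (k - 1)) (k - 1) := by
        rw [pyComb_eq (d + (k - 1)) (k - 1) (by omega) (by omega)]
        have e1 : (d + (k - 1)).toNat = (d + k - 1).toNat := by omega
        rw [e1]
        exact hi
      obtain ⟨xs, hA, hlen, hB⟩ :=
        loops_corr (k - 1).toNat i d (k - 1) [] [d + (k - 1)] hd (by omega) rfl hi'
      have e4 : (d + k - 1 : Int) = d + (k - 1) := by ring
      show ((ithA_loop (k - 1).toNat i d (k - 1) []).1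
          ++ [(ithA_loop (k - 1).toNat i d (k - 1) []).2]).reverse
        = if k - 1 ≤ 0 then [d]
          else ithB_out (ithB_loop (k - 1).toNat (pyComb (d + k - 1) (k - 1) - 1 - i)
            (d + k - 1 - 1) (k - 1) [d + k - 1])
      rw [if_neg (show ¬ k - 1 ≤ 0 by omega), hA, e4, hB, List.singleton_append,
        out_eq xs d (k - 1) hlen]
      simp
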